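-- pv_equiv track=rewrite | github.com/koukyo1994/kaggle-lanl | katayama/src/features/base.py | create_index_tuple
-- ===== SOURCE A (Python) =====
-- def create_index_tuple(slide_size, data_length):
--     start = 0
--     end = 150000
--     index_tuple_list = []
--
--     while end <= data_length:
--         index_tuple_list.append((start, end))
--         start += slide_size
--         end += slide_size
--     index_tuple_list.append((start, data_length-1))
--
--     return index_tuple_list
-- ===== SOURCE B (Python) =====
-- def create_index_tuple(slide_size, data_length):
--     n = (data_length - 150000) // slide_size + 1 if data_length >= 150000 else 0
--     return [(i * slide_size, 150000 + i * slide_size) for i in range(n)] \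
--         + [(n * slide_size, data_length - 1)]
-- ===== Notes on version B (the rewrite author's own statement) =====
-- stated objective: simpler
-- what changed: B computes the window count in closed form with one floor division and builds the tuples by a range comprehension, instead of stepping two cursors in a while loop.
import Mathlib
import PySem

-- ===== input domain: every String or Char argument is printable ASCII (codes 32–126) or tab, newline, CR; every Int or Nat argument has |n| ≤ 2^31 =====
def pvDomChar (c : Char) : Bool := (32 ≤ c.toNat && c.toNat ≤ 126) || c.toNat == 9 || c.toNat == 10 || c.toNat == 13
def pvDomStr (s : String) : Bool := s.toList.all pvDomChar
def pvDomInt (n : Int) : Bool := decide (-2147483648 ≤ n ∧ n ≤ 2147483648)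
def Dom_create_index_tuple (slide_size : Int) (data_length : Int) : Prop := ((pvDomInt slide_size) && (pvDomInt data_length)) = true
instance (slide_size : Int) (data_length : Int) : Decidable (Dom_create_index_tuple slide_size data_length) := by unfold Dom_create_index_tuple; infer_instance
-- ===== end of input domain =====

-- B replaces A's two-cursor while loop by a closed-form window count and a range comprehension (objective: simpler).

-- ===== PORT A =====
-- A's while loop; fuel bounds the iterations (ample inside Pre_, where slide_size ≥ 1 makes `end` strictly increase each pass).
def ciLoop (fuel : Nat) (slide dl start e : Int) (acc : List (Int × Int)) : List (Int × Int) × Int :=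
  match fuel with
  | 0 => (acc, start)
  | Nat.succ f =>
    if e ≤ dl then ciLoop f slide dl (start + slide) (e + slide) (acc ++ [(start, e)])
    else (acc, start)

def create_index_tuple (slide_size : Int) (data_length : Int) : List (Int × Int) :=
  let p := ciLoop ((data_length - 150000).toNat + 1) slide_size data_length 0 150000 []
  p.1 ++ [(p.2, data_length - 1)]

-- ===== PORT B =====
def create_index_tuple_alt (slide_size : Int) (data_length : Int) : List (Int × Int) :=
  let n : Int := if 150000 ≤ data_length then PySem.Int.floordiv (data_length - 150000) slide_size + 1 else 0
  ((PySem.List.pyRange 0 n 1).map (fun i => (i * slide_size, 150000 + i * slide_size)))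
    ++ [(n * slide_size, data_length - 1)]

-- ===== PRECONDITION & SPEC =====
-- Pre_ excludes exactly the inputs where A never returns: with slide_size ≤ 0 and data_length ≥ 150000
-- the while loop's cursor never passes data_length, so A loops forever (and B's // raises for slide_size = 0).
def Pre_create_index_tuple (slide_size : Int) (data_length : Int) : Prop :=
  1 ≤ slide_size ∨ data_length < 150000
instance (slide_size : Int) (data_length : Int) : Decidable (Pre_create_index_tuple slide_size data_length) := by unfold Pre_create_index_tuple; infer_instance

def pvWitness_create_index_tuple : Int × Int := (70000, 300001)

def Spec_create_index_tuple (slide_size : Int) (data_length : Int) (out : List (Int × Int)) : Prop := out = create_index_tuple_alt slide_size data_length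
instance (slide_size : Int) (data_length : Int) (out : List (Int × Int)) : Decidable (Spec_create_index_tuple slide_size data_length out) := by unfold Spec_create_index_tuple; infer_instance

-- ===== CLAIM (what is proved, stated in full; the proofs are below) =====
def Claim_equal_create_index_tuple : Prop := ∀ (slide_size : Int) (data_length : Int), Dom_create_index_tuple slide_size data_length → Pre_create_index_tuple slide_size data_length → Spec_create_index_tuple slide_size data_length (create_index_tuple slide_size data_length)

-- ===== LEMMAS AND PROOFS =====

-- Loop characterisation: with a positive slide and enough fuel, the loop emits one pair per
-- remaining window and ends with the cursor advanced by that many slides.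
theorem ciLoop_eq (slide dl : Int) (hs : 1 ≤ slide) :
    ∀ (fuel : Nat) (start e : Int) (acc : List (Int × Int)), dl - e < (fuel : Int) →
      ciLoop fuel slide dl start e acc =
        (acc ++ (List.range (if e ≤ dl then (PySem.Int.floordiv (dl - e) slide).toNat + 1 else 0)).map
            (fun (k : Nat) => (start + (k : Int) * slide, e + (k : Int) * slide)),
         start + ((if e ≤ dl then (PySem.Int.floordiv (dl - e) slide).toNat + 1 else 0) : Int) * slide) := by
  intro fuel
  induction fuel with
  | zero =>
    intro start e acc hf
    have : ¬ e ≤ dl := by simpa using by omega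
    simp [ciLoop, this]
  | succ f ih =>
    intro start e acc hf
    by_cases he : e ≤ dl
    · have hfd : PySem.Int.floordiv (dl - e) slide = (dl - e) / slide :=
        PySem.Int.floordiv_eq_ediv_of_pos (by omega)
      have hfd' : PySem.Int.floordiv (dl - e - slide) slide = (dl - e - slide) / slide :=
        PySem.Int.floordiv_eq_ediv_of_pos (by omega)
      rw [ciLoop]
      simp only [he, if_true]
      rw [ih (start + slide) (e + slide) (acc ++ [(start, e)]) (by omega)]
      by_cases he2 : e + slide ≤ dl
      · -- one more full window remains
        have hstep : (dl - e) / slide = (dl - e - slide) / slide + 1 := by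
          have := Int.add_mul_ediv_right (dl - e - slide) 1 (show slide ≠ 0 by omega)
          simpa [sub_add_cancel] using this
        have h0 : 0 ≤ (dl - e - slide) / slide := Int.ediv_nonneg (by omega) (by omega)
        have hm : (PySem.Int.floordiv (dl - e) slide).toNat + 1
            = ((PySem.Int.floordiv (dl - e - slide) slide).toNat + 1) + 1 := by
          rw [hfd, hfd']; omega
        have he3 : dl - (e + slide) = dl - e - slide := by ring
        simp only [he2, if_true, he3, hm]
        rw [Prod.mk.injEq]
        constructor
        · conv_rhs => rw [List.range_succ_eq_map]
          simp only [List.map_cons, List.map_map, List.append_assoc, List.singleton_append,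
            Nat.cast_zero, zero_mul, add_zero]
          refine congrArg (acc ++ ·) (congrArg _ ?_)
          apply List.map_congr_left
          intro k _
          simp only [Function.comp_apply]
          push_cast
          rw [Prod.mk.injEq]
          constructor <;> ring
        · have hc : ((PySem.Int.floordiv (dl - e) slide).toNat : Int)
              = ((PySem.Int.floordiv (dl - e - slide) slide).toNat : Int) + 1 := by omega
          rw [hc]; ring
      · -- last window: the quotient is zero
        have hz : (dl - e) / slide = 0 := Int.ediv_eq_zero_of_lt (by omega) (by omega)
        have h0' : (PySem.Int.floordiv (dl - e) slide).toNat = 0 := by rw [hfd, hz]; rfl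
        simp only [he2, if_false, h0', List.range_zero, List.map_nil, Nat.cast_zero, zero_mul, add_zero]
        rw [Prod.mk.injEq]
        constructor
        · simp
        · push_cast; ring
    · rw [ciLoop]
      simp [he]

-- ===== VERDICT (by name: the statement is the Claim_ definition above) =====
theorem create_index_tuple_spec : Claim_equal_create_index_tuple := by
  intro slide dl _ hpre
  unfold Spec_create_index_tuple create_index_tuple create_index_tuple_alt
  by_cases hd : 150000 ≤ dl
  · have hs : 1 ≤ slide := by
      rcases hpre with h | h
      · exact h
      · omega
    have hfuel : dl - 150000 < ((dl - 150000).toNat + 1 : Nat) := by push_cast; omega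
    rw [ciLoop_eq slide dl hs _ 0 150000 [] hfuel]
    have hn0 : 0 ≤ PySem.Int.floordiv (dl - 150000) slide := by
      rw [PySem.Int.floordiv_eq_ediv_of_pos (by omega)]
      exact Int.ediv_nonneg (by omega) (by omega)
    simp only [hd, if_true, List.nil_append]
    rw [PySem.List.pyRange_one]
    simp only [sub_zero, List.map_map]
    have hto : (PySem.Int.floordiv (dl - 150000) slide + 1).toNat
        = (PySem.Int.floordiv (dl - 150000) slide).toNat + 1 := by omega
    rw [hto]
    congr 1
    · apply List.map_congr_left
      intro k _
      simp [Function.comp]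
    · rw [Int.toNat_of_nonneg hn0]
      ring_nf
  · have he : ¬ (150000 : Int) ≤ dl := hd
    have hf : (dl - 150000).toNat + 1 = 1 := by omega
    rw [hf]
    simp [ciLoop, he]
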